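-- pv_equiv track=rewrite | github.com/veighnsche/aur-init | lib/render.py | compute_source_and_sha
-- ===== SOURCE A (Python) =====
-- def compute_source_and_sha(local_sources, vcs, vcs_url, pkgname):
--     parts = []
--     sha = []
--     for s in local_sources:
--         parts.append(f"'{s}'")
--         sha.append("'SKIP'")
--     if vcs:
--         parts.append(f"'{pkgname}::{vcs}+{vcs_url}'")
--         sha.append("'SKIP'")
--     if parts:
--         return f"source=({ ' '.join(parts) })\nsha256sums=({ ' '.join(sha) })"
--     else:
--         return "source=()\nsha256sums=()"
-- ===== SOURCE B (Python) =====
-- def compute_source_and_sha(local_sources, vcs, vcs_url, pkgname):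
--     items = list(local_sources)
--     if vcs:
--         items.append(f"{pkgname}::{vcs}+{vcs_url}")
--     # build both joined strings directly, quoting and inserting separators as we go
--     src = ""
--     sha = ""
--     for x in items:
--         if src:
--             src += " "
--             sha += " "
--         src += f"'{x}'"
--         sha += "'SKIP'"
--     return f"source=({src})\nsha256sums=({sha})"
-- ===== Notes on version B (the rewrite author's own statement) =====
-- stated objective: alternative
-- what changed: Replaces the two parallel quoted-part lists plus str.join and the empty-case branch by a single pass over the (unquoted) item list that accumulates both joined output strings directly, quoting and inserting separators as it goes, with one unconditional return.
import Mathlib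
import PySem

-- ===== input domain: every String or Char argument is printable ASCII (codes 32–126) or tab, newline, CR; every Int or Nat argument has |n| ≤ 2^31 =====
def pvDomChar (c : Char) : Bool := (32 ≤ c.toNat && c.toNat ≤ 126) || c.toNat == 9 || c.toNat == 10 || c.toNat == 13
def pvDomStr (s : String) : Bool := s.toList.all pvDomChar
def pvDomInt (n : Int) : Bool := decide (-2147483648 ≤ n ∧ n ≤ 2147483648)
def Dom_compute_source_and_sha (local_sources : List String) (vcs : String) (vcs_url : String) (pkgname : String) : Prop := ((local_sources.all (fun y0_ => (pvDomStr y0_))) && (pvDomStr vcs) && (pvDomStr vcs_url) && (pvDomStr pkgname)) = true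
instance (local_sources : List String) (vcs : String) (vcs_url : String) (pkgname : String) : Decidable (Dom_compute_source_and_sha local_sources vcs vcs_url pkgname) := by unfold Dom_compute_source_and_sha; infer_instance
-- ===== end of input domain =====

-- ===== PORT A =====
-- B accumulates both joined output strings directly in one pass over the items, instead of two parallel lists joined at the end (objective: alternative).
def compute_source_and_sha (local_sources : List String) (vcs : String) (vcs_url : String) (pkgname : String) : String :=
  let st := local_sources.foldl
    (fun (st : List String × List String) s =>
      (st.1 ++ ["'" ++ s ++ "'"], st.2 ++ ["'SKIP'"])) ([], [])
  let st := if vcs ≠ "" then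
      (st.1 ++ ["'" ++ pkgname ++ "::" ++ vcs ++ "+" ++ vcs_url ++ "'"], st.2 ++ ["'SKIP'"])
    else st
  if st.1 ≠ [] then
    "source=(" ++ PySem.Str.join " " st.1 ++ ")\nsha256sums=(" ++ PySem.Str.join " " st.2 ++ ")"
  else
    "source=()\nsha256sums=()"

-- ===== PORT B =====
def compute_source_and_sha_alt (local_sources : List String) (vcs : String) (vcs_url : String) (pkgname : String) : String :=
  let items := local_sources ++
    (if vcs ≠ "" then [pkgname ++ "::" ++ vcs ++ "+" ++ vcs_url] else [])
  -- one pass with state (src, sha): 'if src: src += " "; sha += " "' then append the quoted item / 'SKIP'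
  let st := items.foldl
    (fun (st : String × String) x =>
      let st := if st.1 ≠ "" then (st.1 ++ " ", st.2 ++ " ") else st
      (st.1 ++ ("'" ++ x ++ "'"), st.2 ++ "'SKIP'"))
    ("", "")
  "source=(" ++ st.1 ++ ")\nsha256sums=(" ++ st.2 ++ ")"

-- ===== PRECONDITION & SPEC =====
def Spec_compute_source_and_sha (local_sources : List String) (vcs : String) (vcs_url : String) (pkgname : String) (out : String) : Prop := out = compute_source_and_sha_alt local_sources vcs vcs_url pkgname
instance (local_sources : List String) (vcs : String) (vcs_url : String) (pkgname : String) (out : String) : Decidable (Spec_compute_source_and_sha local_sources vcs vcs_url pkgname out) := by unfold Spec_compute_source_and_sha; infer_instance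

-- ===== CLAIM =====
def Claim_equal_compute_source_and_sha : Prop := ∀ (local_sources : List String) (vcs : String) (vcs_url : String) (pkgname : String), Dom_compute_source_and_sha local_sources vcs vcs_url pkgname → Spec_compute_source_and_sha local_sources vcs vcs_url pkgname (compute_source_and_sha local_sources vcs vcs_url pkgname)

-- ===== LEMMAS AND PROOFS =====
-- A's fold builds the quoted parts and the matching replicate of 'SKIP'
theorem pv_fold_char (local_sources : List String) (p q : List String) :
    local_sources.foldl
      (fun (st : List String × List String) s =>
        (st.1 ++ ["'" ++ s ++ "'"], st.2 ++ ["'SKIP'"])) (p, q)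
    = (p ++ local_sources.map (fun s => "'" ++ s ++ "'"),
       q ++ List.replicate local_sources.length "'SKIP'") := by
  induction local_sources generalizing p q with
  | nil => simp
  | cons x xs ih =>
    simp only [List.foldl_cons, List.map_cons, List.length_cons]
    rw [ih]
    simp [List.replicate_succ]

-- B's accumulating pass, started on a nonempty src, appends the separated joins
theorem pv_fwd (xs : List String) (s k : String) (hs : ¬ s = "") :
    xs.foldl
      (fun (st : String × String) x =>
        let st := if st.1 ≠ "" then (st.1 ++ " ", st.2 ++ " ") else st
        (st.1 ++ ("'" ++ x ++ "'"), st.2 ++ "'SKIP'")) (s, k)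
    = if xs = [] then (s, k)
      else (s ++ " " ++ PySem.Str.join " " (xs.map (fun t => "'" ++ t ++ "'")),
            k ++ " " ++ PySem.Str.join " " (List.replicate xs.length "'SKIP'")) := by
  induction xs generalizing s k with
  | nil => simp
  | cons x rest ih =>
    simp only [List.foldl_cons, if_pos hs, ne_eq, hs, not_false_iff, if_true,
      reduceCtorEq, if_false, List.cons_ne_nil]
    rw [ih _ _ (by rw [← String.toList_inj]; simp)]
    cases rest with
    | nil =>
      apply Prod.ext
      · rw [← String.toList_inj]; simp [PySem.Str.toList_join, PySem.Chars.join_singleton]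
      · rw [← String.toList_inj]; simp [PySem.Str.toList_join, PySem.Chars.join_singleton]
    | cons y rest' =>
      simp only [if_neg (List.cons_ne_nil y rest')]
      apply Prod.ext
      · rw [← String.toList_inj]; simp [PySem.Str.toList_join, PySem.Chars.join_cons_cons]
      · rw [← String.toList_inj]
        simp [PySem.Str.toList_join, List.replicate_succ, PySem.Chars.join_cons_cons]

-- from the empty accumulators, the pass produces exactly the two joins A builds
theorem pv_fwd_top (xs : List String) :
    xs.foldl
      (fun (st : String × String) x =>
        let st := if st.1 ≠ "" then (st.1 ++ " ", st.2 ++ " ") else st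
        (st.1 ++ ("'" ++ x ++ "'"), st.2 ++ "'SKIP'")) ("", "")
    = (PySem.Str.join " " (xs.map (fun t => "'" ++ t ++ "'")),
       PySem.Str.join " " (List.replicate xs.length "'SKIP'")) := by
  cases xs with
  | nil =>
    apply Prod.ext <;> (rw [← String.toList_inj]; simp [PySem.Str.toList_join, PySem.Chars.join_nil])
  | cons x rest =>
    simp only [List.foldl_cons, ne_eq, not_true_eq_false, if_false]
    rw [pv_fwd _ _ _ (by rw [← String.toList_inj]; simp)]
    cases rest with
    | nil =>
      apply Prod.ext <;>
        (rw [← String.toList_inj]; simp [PySem.Str.toList_join, PySem.Chars.join_singleton])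
    | cons y rest' =>
      simp only [if_neg (List.cons_ne_nil y rest')]
      apply Prod.ext
      · rw [← String.toList_inj]; simp [PySem.Str.toList_join, PySem.Chars.join_cons_cons]
      · rw [← String.toList_inj]
        simp [PySem.Str.toList_join, List.replicate_succ, PySem.Chars.join_cons_cons]

-- ===== VERDICT =====
theorem compute_source_and_sha_spec : Claim_equal_compute_source_and_sha := by
  intro local_sources vcs vcs_url pkgname _
  unfold Spec_compute_source_and_sha compute_source_and_sha compute_source_and_sha_alt
  simp only [pv_fold_char, List.nil_append]
  by_cases hv : vcs = ""
  · simp only [hv, ne_eq, not_true_eq_false, if_false, List.append_nil]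
    by_cases hl : local_sources = []
    · subst hl; simp [PySem.Str.join]
    · rw [if_pos (by simpa using hl), pv_fwd_top]
  · simp only [ne_eq, hv, not_false_iff, if_true]
    rw [if_pos (by simp), pv_fwd_top]
    simp [List.replicate_succ', String.append_assoc]
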